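-- pv_equiv track=rewrite | github.com/adhithyan15/coding-adventures | code/packages/python/fpga-place-route-bridge/src/fpga_place_route_bridge/bridge.py | _expand_truth_table
-- ===== SOURCE A (Python) =====
-- def _expand_truth_table(table: list[int], n_inputs: int, target_inputs: int) -> list[int]:
--     """Expand a 2^n_inputs truth table to 2^target_inputs by ignoring extra
--     inputs (output stays the same regardless of higher input bits)."""
--     if n_inputs == target_inputs:
--         return list(table)
--     if n_inputs > target_inputs:
--         raise ValueError(f"can't expand {n_inputs}-input truth table to {target_inputs}")
--     expanded = []
--     target_size = 1 << target_inputs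
--     n_size = 1 << n_inputs if n_inputs > 0 else 1
--     for i in range(target_size):
--         # Use only the low n_inputs bits to index the original table
--         expanded.append(table[i % n_size] if n_inputs > 0 else table[0])
--     return expanded
-- ===== SOURCE B (Python) =====
-- def _expand_truth_table(table: list[int], n_inputs: int, target_inputs: int) -> list[int]:
--     """Expand a 2^n_inputs truth table to 2^target_inputs by replicating one
--     period block-wise instead of per-index modulo lookups."""
--     if n_inputs == target_inputs:
--         return list(table)
--     if n_inputs > target_inputs:
--         raise ValueError(f"can't expand {n_inputs}-input truth table to {target_inputs}")
--     n_size = 1 << n_inputs if n_inputs > 0 else 1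
--     period = table[:n_size]
--     expanded = []
--     for _ in range((1 << target_inputs) // n_size):
--         expanded += period
--     return expanded
-- ===== Notes on version B (the rewrite author's own statement) =====
-- stated objective: simpler
-- what changed: Instead of looping over every output index and re-indexing the table modulo its size, B slices one period table[:n_size] and extends the result by that whole block (1 << target_inputs) // n_size times.
import Mathlib
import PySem

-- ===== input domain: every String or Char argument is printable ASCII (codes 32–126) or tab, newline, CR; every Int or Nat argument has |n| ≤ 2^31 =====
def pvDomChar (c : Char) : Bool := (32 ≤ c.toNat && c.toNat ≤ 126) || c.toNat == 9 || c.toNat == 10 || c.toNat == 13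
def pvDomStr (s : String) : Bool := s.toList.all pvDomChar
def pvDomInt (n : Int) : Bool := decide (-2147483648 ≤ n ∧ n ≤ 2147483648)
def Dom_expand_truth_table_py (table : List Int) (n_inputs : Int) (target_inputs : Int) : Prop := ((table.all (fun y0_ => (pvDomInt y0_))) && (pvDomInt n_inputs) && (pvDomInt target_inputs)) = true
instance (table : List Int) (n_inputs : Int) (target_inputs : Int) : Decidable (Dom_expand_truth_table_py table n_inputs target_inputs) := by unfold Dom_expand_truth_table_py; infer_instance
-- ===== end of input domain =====

-- B replaces the per-index loop with modulo lookups by block replication of one period: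
-- it slices table[:n_size] once and extends the output by that block
-- (1 << target_inputs) // n_size times; equal return values on Pre_.

-- ===== PORT A =====
def expand_truth_table_py (table : List Int) (n_inputs : Int) (target_inputs : Int) : List Int :=
  if n_inputs = target_inputs then table
  else if n_inputs > target_inputs then []  -- Python raises ValueError here; excluded by Pre_
  else
    let target_size : Int := (1 : Int) <<< target_inputs.toNat
    let n_size : Int := if n_inputs > 0 then (1 : Int) <<< n_inputs.toNat else 1
    (PySem.List.pyRange 0 target_size 1).foldl
      (fun acc i =>
        acc ++ [if n_inputs > 0 then PySem.List.pyGetD table (PySem.Int.mod i n_size) 0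
                else PySem.List.pyGetD table 0 0]) []

-- ===== PORT B =====
def expand_truth_table_py_alt (table : List Int) (n_inputs : Int) (target_inputs : Int) : List Int :=
  if n_inputs = target_inputs then table
  else if n_inputs > target_inputs then []  -- Python raises ValueError here; excluded by Pre_
  else
    let n_size : Int := if n_inputs > 0 then (1 : Int) <<< n_inputs.toNat else 1
    let period : List Int := PySem.List.slice table none (some n_size)
    (PySem.List.pyRange 0 (PySem.Int.floordiv ((1 : Int) <<< target_inputs.toNat) n_size) 1).foldl
      (fun acc _ => acc ++ period) []

-- ===== PRECONDITION & SPEC =====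
-- Pre_ excludes exactly the inputs on which the Python A raises: n_inputs > target_inputs
-- (ValueError), a negative target exponent (ValueError on 1 << target_inputs), and a table
-- shorter than one period 2^n_inputs (resp. empty for n_inputs ≤ 0), where A hits IndexError.
def Pre_expand_truth_table_py (table : List Int) (n_inputs : Int) (target_inputs : Int) : Prop :=
  n_inputs = target_inputs ∨
    (n_inputs < target_inputs ∧ 0 ≤ target_inputs ∧
      (if 0 < n_inputs then (2 : Nat) ^ n_inputs.toNat ≤ table.length else table ≠ []))
instance (table : List Int) (n_inputs : Int) (target_inputs : Int) : Decidable (Pre_expand_truth_table_py table n_inputs target_inputs) := by unfold Pre_expand_truth_table_py; infer_instance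

def pvWitness_expand_truth_table_py : List Int × Int × Int := ([1, 0], 1, 3)

def Spec_expand_truth_table_py (table : List Int) (n_inputs : Int) (target_inputs : Int) (out : List Int) : Prop := out = expand_truth_table_py_alt table n_inputs target_inputs
instance (table : List Int) (n_inputs : Int) (target_inputs : Int) (out : List Int) : Decidable (Spec_expand_truth_table_py table n_inputs target_inputs out) := by unfold Spec_expand_truth_table_py; infer_instance

-- ===== CLAIM (what is proved, stated in full; the proofs are below) =====
def Claim_equal_expand_truth_table_py : Prop := ∀ (table : List Int) (n_inputs : Int) (target_inputs : Int), Dom_expand_truth_table_py table n_inputs target_inputs → Pre_expand_truth_table_py table n_inputs target_inputs → Spec_expand_truth_table_py table n_inputs target_inputs (expand_truth_table_py table n_inputs target_inputs)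

-- ===== LEMMAS AND PROOFS =====

-- extending by a constant block per iteration is flattened replication
lemma foldl_const_append (l : List Int) (p init : List Int) :
    l.foldl (fun acc _ => acc ++ p) init = init ++ (List.replicate l.length p).flatten := by
  induction l generalizing init with
  | nil => simp
  | cons x xs ih => simp [ih, List.replicate_succ, List.append_assoc]

-- one period read off by getD equals the prefix of length k
lemma map_range_getD_eq_take (table : List Int) (k : Nat) (hk : k ≤ table.length) :
    (List.range k).map (fun j => table.getD j 0) = table.take k := by
  apply List.ext_getElem
  · simp [hk]
  · intro i h1 h2
    simp only [List.length_take, lt_min_iff] at h2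
    simp [List.getD_eq_getElem?_getD, List.getElem?_eq_getElem h2.2]

-- c periods read off by modulo indexing equal the flattened replication of one period
lemma map_range_mod_eq_flatten (table : List Int) (k c : Nat)
    (hlen : k ≤ table.length) :
    (List.range (c * k)).map (fun j => table.getD (j % k) 0) =
      (List.replicate c (table.take k)).flatten := by
  induction c with
  | zero => simp
  | succ c ih =>
    rw [Nat.succ_mul, List.range_add, List.map_append, ih, List.map_map]
    have hblk : List.map ((fun j => table.getD (j % k) 0) ∘ fun x => c * k + x)
        (List.range k) = table.take k := by
      rw [← map_range_getD_eq_take table k hlen]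
      apply List.map_congr_left
      intro j hj
      simp only [Function.comp]
      rw [Nat.add_comm, Nat.add_mul_mod_self_right, Nat.mod_eq_of_lt (List.mem_range.mp hj)]
    rw [hblk, List.replicate_succ', List.flatten_append]
    simp

-- ===== VERDICT (by name: the statement is the Claim_ definition above) =====
theorem expand_truth_table_py_spec : Claim_equal_expand_truth_table_py := by
  intro table n t _ hpre
  unfold Spec_expand_truth_table_py expand_truth_table_py expand_truth_table_py_alt
  rcases hpre with heq | ⟨hlt, ht, hlen⟩
  · simp [heq]
  · have hne : ¬ n = t := by omega
    have hngt : ¬ n > t := by omega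
    simp only [hne, hngt, if_false]
    have hshift : ∀ m : Nat, (1 : Int) <<< m = ((2 ^ m : Nat) : Int) := by
      intro m
      rw [Int.shiftLeft_eq]
      push_cast
      ring
    by_cases hn : 0 < n
    · -- n_inputs > 0 : index by i % 2^n
      have hkt : n.toNat < t.toNat := by omega
      simp only [hn, if_pos, hshift]
      set k : Nat := 2 ^ n.toNat with hkdef
      set N : Nat := 2 ^ t.toNat with hNdef
      have hdvd : k ∣ N := pow_dvd_pow 2 (le_of_lt hkt)
      have hlen' : k ≤ table.length := by simpa [hn] using hlen
      rw [PySem.Int.floordiv_natCast N k, PySem.List.foldl_append_singleton_eq_map,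
        foldl_const_append, PySem.List.length_pyRange_one]
      simp only [List.nil_append, PySem.List.pyRange_one, Int.sub_zero, Int.toNat_natCast,
        List.map_map, Function.comp_def, Int.zero_add]
      have hpt : ∀ j ∈ List.range N,
          PySem.List.pyGetD table (PySem.Int.mod ((j : Nat) : Int) ((k : Nat) : Int)) 0
            = table.getD (j % k) 0 := by
        intro j _
        rw [PySem.Int.mod_natCast, PySem.List.pyGetD_natCast]
      rw [List.map_congr_left hpt, ← Nat.div_mul_cancel hdvd,
        map_range_mod_eq_flatten table k (N / k) hlen', Nat.div_mul_cancel hdvd,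
        PySem.List.slice_to_natCast]
    · -- n_inputs ≤ 0 : constant table[0], period 1
      simp only [hn, if_false, hshift]
      set N : Nat := 2 ^ t.toNat with hNdef
      have htbl : table ≠ [] := by simpa [hn] using hlen
      have hlen1 : 1 ≤ table.length := List.length_pos_iff.mpr htbl
      have hdiv : PySem.Int.floordiv ((N : Nat) : Int) 1 = ((N : Nat) : Int) := by
        rw [PySem.Int.floordiv_eq_ediv_of_pos (by norm_num)]; simp
      rw [hdiv, PySem.List.foldl_append_singleton_eq_map,
        foldl_const_append, PySem.List.length_pyRange_one]
      simp only [List.nil_append, PySem.List.pyRange_one, Int.sub_zero, Int.toNat_natCast,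
        List.map_map, Function.comp_def, Int.zero_add]
      have hpt : ∀ j ∈ List.range N,
          PySem.List.pyGetD table 0 0 = table.getD (j % 1) 0 := by
        intro j _
        rw [PySem.List.pyGetD_zero, Nat.mod_one]
      rw [List.map_congr_left hpt, ← Nat.mul_one N,
        map_range_mod_eq_flatten table 1 N hlen1, Nat.mul_one,
        show (1 : Int) = ((1 : Nat) : Int) from rfl, PySem.List.slice_to_natCast]
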